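-- pv_equiv track=rewrite | github.com/luatrilogy/Exploring-Eulers-Sum-of-Powers-Through-Exact-Computation | old versions/main_updated.py | sieve_b_values
-- ===== SOURCE A (Python) =====
-- from typing import Dict, List, Tuple, Iterable, Optional, Union
--
-- def kth_residues_mask(k: int, p: int) -> int:
--     mask = 0
--     for x in range(p):
--         mask |= 1 << pow(x, k, p)
--     return mask
--
-- def add_cyclic(mask: int, shift: int, p: int) -> int:
--     allbits = (1 << p) - 1
--     shift %= p
--     return ((mask << shift) | (mask >> (p - shift))) & allbits
--
-- def mfold_sumset_mask(res_mask: int, m: int, p: int) -> int: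
--     reachable = 1  # {0}
--     for _ in range(m):
--         new = 0
--         rm = res_mask
--         while rm:
--             lsb = rm & -rm
--             r = (lsb.bit_length() - 1)
--             new |= add_cyclic(reachable, r, p)
--             rm -= lsb
--         reachable = new
--     return reachable
--
-- def sieve_b_values(k: int, m: int, primes: List[int], max_b: int) -> List[int]:
--     """Keep b where b^k mod p is representable as sum of m k-th power residues mod p for all primes p."""
--     tables = []
--     for p in primes:
--         res = kth_residues_mask(k, p)
--         reachable = mfold_sumset_mask(res, m, p)
--         tables.append((p, reachable))
--
--     good: List[int] = []
--     for b in range(2, max_b + 1):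
--         ok = True
--         for p, reachable in tables:
--             t = pow(b, k, p)
--             if ((reachable >> t) & 1) == 0:
--                 ok = False
--                 break
--         if ok:
--             good.append(b)
--     return good
-- ===== SOURCE B (Python) =====
-- def _pack(bits, w):
--     """Pack a boolean vector into one integer with one w-bit field per entry
--     (divide and conquer, so packing is quasi-linear in the packed size)."""
--     n = len(bits)
--     if n == 0:
--         return 0
--     if n == 1:
--         return 1 if bits[0] else 0
--     h = n // 2
--     return _pack(bits[:h], w) + (_pack(bits[h:], w) << (h * w))
--
--
-- def _fields_nonzero(x, n, w):
--     """Booleans telling which of the n w-bit fields of x are nonzero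
--     (divide and conquer, splitting x once per level instead of per field)."""
--     if n == 0:
--         return []
--     if n == 1:
--         return [x & ((1 << w) - 1) != 0]
--     h = n // 2
--     return _fields_nonzero(x & ((1 << (h * w)) - 1), h, w) + _fields_nonzero(x >> (h * w), n - h, w)
--
--
-- def _conv(a, b, p):
--     """Support of the cyclic (mod p) convolution of two boolean vectors, by
--     Kronecker substitution: one big-integer multiplication computes all pair
--     counts at once (a field holds a count of at most p, so it cannot overflow)."""
--     w = p.bit_length() + 1
--     prod = _pack(a, w) * _pack(b, w)
--     nz = _fields_nonzero(prod, max(2 * p - 1, 0), w)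
--     out = [False] * p
--     for t in range(2 * p - 1):
--         if nz[t]:
--             out[t % p] = True
--     return out
--
--
-- def _reach(k, m, p):
--     """The m-fold sumset of the k-th power residues mod p, computed as base**m
--     under boolean cyclic convolution by binary exponentiation (log m convolutions)."""
--     residues = {pow(x, k, p) for x in range(p)}
--     base = [r in residues for r in range(p)]
--     reach = [r == 0 for r in range(p)]  # the singleton {0}
--     e = m
--     while e > 0:
--         if e & 1:
--             reach = _conv(reach, base, p)
--         base = _conv(base, base, p)
--         e >>= 1
--     return reach
--
--
-- def sieve_b_values(k, m, primes, max_b):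
--     """Keep b where b^k mod p is representable as sum of m k-th power residues mod p for all primes p."""
--     tables = [(p, _reach(k, m, p)) for p in primes]
--     return [b for b in range(2, max_b + 1)
--             if all(reach[pow(b, k, p)] for p, reach in tables)]
-- ===== Notes on version B (the rewrite author's own statement) =====
-- stated objective: alternative
-- what changed: B computes each prime's reachable set as the m-th power of the residue indicator vector under boolean cyclic convolution via binary exponentiation, with each convolution done by Kronecker substitution (pack into w-bit fields, one big-integer multiplication, unpack the pair counts), instead of A's m successive rounds of lsb-extraction and bitmask rotate-OR sumsets.
-- outside the precondition, e.g. on sieve_b_values(124, 1, [-1, -2, 1, -3], 5): A returns [], B raises IndexError; on sieve_b_values(-1, 1, [-1], 5): A returns [], B raises IndexError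
import Mathlib
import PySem

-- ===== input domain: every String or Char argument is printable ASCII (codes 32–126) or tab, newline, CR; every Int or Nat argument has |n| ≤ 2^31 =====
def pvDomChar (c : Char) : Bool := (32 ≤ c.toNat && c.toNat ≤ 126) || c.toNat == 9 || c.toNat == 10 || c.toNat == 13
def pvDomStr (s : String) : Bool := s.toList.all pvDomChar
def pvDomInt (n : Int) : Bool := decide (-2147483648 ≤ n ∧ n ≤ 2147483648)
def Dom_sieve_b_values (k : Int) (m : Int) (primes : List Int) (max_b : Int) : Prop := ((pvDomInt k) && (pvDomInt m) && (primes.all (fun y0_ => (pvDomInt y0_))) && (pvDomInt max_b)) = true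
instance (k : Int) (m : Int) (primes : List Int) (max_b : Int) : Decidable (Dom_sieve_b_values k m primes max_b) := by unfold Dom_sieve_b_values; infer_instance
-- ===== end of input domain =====

-- B computes each prime's reachable set as the m-th power of the residue indicator vector under
-- boolean cyclic convolution (each convolution by Kronecker substitution: pack, one big-integer
-- multiply, unpack), by binary exponentiation, instead of A's m rotate-OR bitmask rounds.

-- ===== PORT A =====
-- Under Pre_ all Python ints used as masks/shift amounts/exponents here are nonnegative, so masks
-- are Nat (Nat's <<<, >>>, &&&, ||| are exact for Python's on nonnegative ints) and the exponent of
-- pow(x, k, p) is k.toNat (= k, since Pre_ gives 0 ≤ k whenever pow is reached).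
def kth_residues_mask (k : Int) (p : Int) : Nat :=
  (PySem.List.pyRange 0 p 1).foldl
    (fun mask x => mask ||| (1 <<< (PySem.Int.powMod x k.toNat p).toNat)) 0

def add_cyclic (mask : Nat) (shift : Int) (p : Int) : Nat :=
  let allbits : Nat := (1 <<< p.toNat) - 1
  let s : Nat := (PySem.Int.mod shift p).toNat
  ((mask <<< s) ||| (mask >>> (p.toNat - s))) &&& allbits

-- the 'while rm:' loop of mfold_sumset_mask, step for step on nonnegative ints:
-- lsb = 'rm & -rm' = rm - (rm &&& (rm - 1)); r = 'lsb.bit_length() - 1' = lsb.log2 (lsb is a power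
-- of two); 'rm -= lsb' leaves rm &&& (rm - 1) (the lowest set bit cleared); all exact here
def mfold_inner (reachable : Nat) (p : Int) (rm : Nat) (new : Nat) : Nat :=
  if rm = 0 then new
  else
    mfold_inner reachable p (rm &&& (rm - 1))
      (new ||| add_cyclic reachable (((rm - (rm &&& (rm - 1))).log2 : Nat) : Int) p)
termination_by rm
decreasing_by
  have h1 : rm &&& (rm - 1) ≤ rm - 1 := Nat.and_le_right
  omega

def mfold_sumset_mask (res_mask : Nat) (m : Int) (p : Int) : Nat :=
  (List.range m.toNat).foldl (fun reachable _ => mfold_inner reachable p res_mask 0) 1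

-- the inner 'for p, reachable in tables: … break' loop of the b-scan
def sieve_check (k : Int) (b : Int) : List (Int × Nat) → Bool
  | [] => true
  | (p, reachable) :: rest =>
    let t := PySem.Int.powMod b k.toNat p
    if (reachable >>> t.toNat) &&& 1 == 0 then false
    else sieve_check k b rest

def sieve_b_values (k : Int) (m : Int) (primes : List Int) (max_b : Int) : List Int :=
  let tables := primes.foldl (fun tables p =>
    let res := kth_residues_mask k p
    let reachable := mfold_sumset_mask res m p
    tables ++ [(p, reachable)]) []
  (PySem.List.pyRange 2 (max_b + 1) 1).foldl
    (fun good b => if sieve_check k b tables then good ++ [b] else good) []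

-- ===== PORT B =====
-- _pack: n = len(bits); bits[:h] / bits[h:] are slices; bits[0] is in range when n = 1
def pvPack (bits : List Bool) (w : Nat) : Nat :=
  if bits.length = 0 then 0
  else if bits.length = 1 then (if PySem.List.pyGetD bits 0 false then 1 else 0)
  else
    pvPack (PySem.List.slice bits none (some ((bits.length / 2 : Nat) : Int))) w
      + (pvPack (PySem.List.slice bits (some ((bits.length / 2 : Nat) : Int)) none) w
          <<< ((bits.length / 2) * w))
termination_by bits.length
decreasing_by
  · rw [PySem.List.slice_to bits (by positivity)]
    simp only [Int.toNat_natCast, List.length_take]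
    omega
  · rw [PySem.List.slice_from bits (by positivity)]
    simp only [Int.toNat_natCast, List.length_drop]
    omega

-- _fields_nonzero: the count n is a Nat here (its Python value max(2*p-1, 0) is nonnegative)
def pvFieldsNZ (x : Nat) (n : Nat) (w : Nat) : List Bool :=
  if n = 0 then []
  else if n = 1 then [x &&& ((1 <<< w) - 1) != 0]
  else
    pvFieldsNZ (x &&& ((1 <<< (n / 2 * w)) - 1)) (n / 2) w
      ++ pvFieldsNZ (x >>> (n / 2 * w)) (n - n / 2) w
termination_by n
decreasing_by
  · omega
  · omega

-- _conv: '(2 * p - 1).toNat' is Python's max(2 * p - 1, 0); nz[t] / out[t % p] are in range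
-- where B runs, so they are pyGetD / pySetD (exact there)
def pvConv (p : Int) (a b : List Bool) : List Bool :=
  let w := PySem.Int.bitLength p + 1
  let prod := pvPack a w * pvPack b w
  let nz := pvFieldsNZ prod (2 * p - 1).toNat w
  (PySem.List.pyRange 0 (2 * p - 1) 1).foldl
    (fun out t => if PySem.List.pyGetD nz t false
      then PySem.List.pySetD out (PySem.Int.mod t p) true else out)
    (List.replicate p.toNat false)

-- the 'while e > 0: …' binary-exponentiation loop of _reach; inside the loop e > 0, where
-- 'e & 1 == 1' is 'e % 2 == 1' and 'e >>= 1' is floor division by 2 (exact there)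
def pvBinExp (p : Int) (reach base : List Bool) (e : Int) : List Bool :=
  if e ≤ 0 then reach
  else
    pvBinExp p (if PySem.Int.mod e 2 == 1 then pvConv p reach base else reach)
      (pvConv p base base) (PySem.Int.floordiv e 2)
termination_by e.toNat
decreasing_by
  have h2 : PySem.Int.floordiv e 2 = e / 2 := PySem.Int.floordiv_eq_ediv_of_pos (by omega)
  omega

def pv_reach (k : Int) (m : Int) (p : Int) : List Bool :=
  let residues := PySem.Set.ofList
    ((PySem.List.pyRange 0 p 1).map (fun x => PySem.Int.powMod x k.toNat p))
  let base := (PySem.List.pyRange 0 p 1).map (fun r => PySem.Set.contains residues r)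
  let reach := (PySem.List.pyRange 0 p 1).map (fun r => r == 0)
  pvBinExp p reach base m

def sieve_b_values_alt (k : Int) (m : Int) (primes : List Int) (max_b : Int) : List Int :=
  let tables := primes.map (fun p => (p, pv_reach k m p))
  (PySem.List.pyRange 2 (max_b + 1) 1).filter
    (fun b => tables.all (fun pt => PySem.List.pyGetD pt.2 (PySem.Int.powMod b k.toNat pt.1) false))

-- ===== PRECONDITION & SPEC =====
-- Pre_ excludes a negative k whenever some pow call gets a modulus other than 1 (Python raises
-- ValueError on the non-invertible base 0) and non-positive moduli whenever the b-loop runs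
-- (pow/>> raise there, except that a zero residue mask can make A reject every b and return []
-- just before the raising prime is used — B raises IndexError there instead).
def Pre_sieve_b_values (k : Int) (m : Int) (primes : List Int) (max_b : Int) : Prop :=
  (0 ≤ k ∨ (∀ p ∈ primes, p = 1) ∨ (max_b ≤ 1 ∧ ∀ p ∈ primes, p ≤ 1)) ∧
  ((∀ p ∈ primes, 1 ≤ p) ∨ max_b ≤ 1)
instance (k : Int) (m : Int) (primes : List Int) (max_b : Int) : Decidable (Pre_sieve_b_values k m primes max_b) := by unfold Pre_sieve_b_values; infer_instance
def pvWitness_sieve_b_values : Int × Int × List Int × Int := (3, 2, [3, 5], 10)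

def Spec_sieve_b_values (k : Int) (m : Int) (primes : List Int) (max_b : Int) (out : List Int) : Prop := out = sieve_b_values_alt k m primes max_b
instance (k : Int) (m : Int) (primes : List Int) (max_b : Int) (out : List Int) : Decidable (Spec_sieve_b_values k m primes max_b out) := by unfold Spec_sieve_b_values; infer_instance

-- ===== CLAIM (what is proved, stated in full; the proofs are below) =====
def Claim_equal_sieve_b_values : Prop := ∀ (k : Int) (m : Int) (primes : List Int) (max_b : Int), Dom_sieve_b_values k m primes max_b → Pre_sieve_b_values k m primes max_b → Spec_sieve_b_values k m primes max_b (sieve_b_values k m primes max_b)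

-- ===== LEMMAS AND PROOFS =====

-- the abstract model: subsets of Z/P as predicates on Nat, with the cyclic-sumset operation
def sAdd (P : Nat) (S T : Nat → Prop) : Nat → Prop :=
  fun t => ∃ i j, S i ∧ T j ∧ (i + j) % P = t

def sPow (P : Nat) (S : Nat → Prop) : Nat → (Nat → Prop)
  | 0 => fun t => t = 0
  | n + 1 => sAdd P S (sPow P S n)

def sBdd (P : Nat) (S : Nat → Prop) : Prop := ∀ t, S t → t < P

-- semantics of a boolean table and of a bitmask
def TS (T : List Bool) : Nat → Prop := fun t => T.getD t false = true
def MS (X : Nat) : Nat → Prop := fun t => X.testBit t = true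

lemma sAdd_comm (P : Nat) (S T : Nat → Prop) : sAdd P S T = sAdd P T S := by
  funext t; unfold sAdd
  apply propext
  constructor <;> rintro ⟨i, j, h1, h2, h3⟩ <;> exact ⟨j, i, h2, h1, by rw [Nat.add_comm]; exact h3⟩

lemma sAdd_assoc (P : Nat) (S T U : Nat → Prop) :
    sAdd P (sAdd P S T) U = sAdd P S (sAdd P T U) := by
  funext t; unfold sAdd
  apply propext
  constructor
  · rintro ⟨x, l, ⟨i, j, hi, hj, rfl⟩, hl, rfl⟩
    exact ⟨i, (j + l) % P, hi, ⟨j, l, hj, hl, rfl⟩, by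
      rw [Nat.add_mod_mod, Nat.mod_add_mod, Nat.add_assoc]⟩
  · rintro ⟨i, x, hi, ⟨j, l, hj, hl, rfl⟩, rfl⟩
    exact ⟨(i + j) % P, l, ⟨i, j, hi, hj, rfl⟩, hl, by
      rw [Nat.add_mod_mod, Nat.mod_add_mod, Nat.add_assoc]⟩

lemma sBdd_sAdd (P : Nat) (hP : 0 < P) (S T : Nat → Prop) : sBdd P (sAdd P S T) := by
  rintro t ⟨i, j, _, _, rfl⟩; exact Nat.mod_lt _ hP

lemma sAdd_sing (P : Nat) (hP : 0 < P) (S : Nat → Prop) (hS : sBdd P S) :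
    sAdd P S (fun t => t = 0) = S := by
  funext t; unfold sAdd
  apply propext
  constructor
  · rintro ⟨i, j, hi, rfl, rfl⟩
    rwa [Nat.add_zero, Nat.mod_eq_of_lt (hS i hi)]
  · intro ht
    exact ⟨t, 0, ht, rfl, by rw [Nat.add_zero, Nat.mod_eq_of_lt (hS t ht)]⟩

lemma sBdd_sPow (P : Nat) (hP : 0 < P) (S : Nat → Prop) (n : Nat) : sBdd P (sPow P S n) := by
  cases n with
  | zero => intro t ht; simp only [sPow] at ht; omega
  | succ n => exact sBdd_sAdd P hP _ _

lemma sPow_two_mul (P : Nat) (hP : 0 < P) (S : Nat → Prop) (n : Nat) :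
    sPow P (sAdd P S S) n = sPow P S (2 * n) := by
  induction n with
  | zero => rfl
  | succ n IH =>
    have h2 : 2 * (n + 1) = (2 * n) + 1 + 1 := by omega
    rw [sPow, IH, h2, sPow, sPow, ← sAdd_assoc]

lemma lsb_spec (n : Nat) (hn : n ≠ 0) :
    ∃ e, n - (n &&& (n - 1)) = 2 ^ e ∧
      ∀ r, n.testBit r = true ↔ (r = e ∨ (n &&& (n - 1)).testBit r = true) := by
  induction n using Nat.strong_induction_on with
  | _ n IH =>
  rcases Nat.even_or_odd n with he | ho
  · obtain ⟨n', hn'⟩ : ∃ n', n = 2 * n' := ⟨n / 2, by obtain ⟨c, hc⟩ := he; omega⟩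
    subst hn'
    have hn0 : n' ≠ 0 := by omega
    obtain ⟨e', h1, h2⟩ := IH n' (by omega) hn0
    have hand' : n' &&& (n' - 1) ≤ n' - 1 := Nat.and_le_right
    have hd1 : (2 * n' - 1) / 2 = n' - 1 := by omega
    have hd2 : 2 * n' / 2 = n' := by omega
    have hd3 : 2 * (n' &&& (n' - 1)) / 2 = n' &&& (n' - 1) := by omega
    have hkey : (2 * n') &&& (2 * n' - 1) = 2 * (n' &&& (n' - 1)) := by
      apply Nat.eq_of_testBit_eq
      intro i
      cases i with
      | zero =>
        simp [Nat.testBit_zero, Nat.mul_mod_right]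
      | succ i =>
        rw [Nat.testBit_and]
        simp only [Nat.testBit_succ, hd1, hd2, hd3]
        rw [← Nat.testBit_and]
    refine ⟨e' + 1, ?_, ?_⟩
    · rw [hkey]
      have : 2 * n' - 2 * (n' &&& (n' - 1)) = 2 * (n' - (n' &&& (n' - 1))) := by omega
      rw [this, h1, pow_succ, Nat.mul_comm]
    · intro r
      rw [hkey]
      cases r with
      | zero =>
        simp [Nat.testBit_zero, Nat.mul_mod_right]
      | succ i =>
        simp only [Nat.testBit_succ, hd2, hd3]
        rw [h2 i]
        constructor
        · rintro (rfl | h) <;> [left; right] <;> [rfl; exact h]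
        · rintro (h | h)
          · left; omega
          · right; exact h
  · have hmod : n % 2 = 1 := Nat.odd_iff.mp ho
    have hd1 : (n - 1) / 2 = n / 2 := by omega
    have hkey : n &&& (n - 1) = n - 1 := by
      apply Nat.eq_of_testBit_eq
      intro i
      cases i with
      | zero =>
        have : (n - 1) % 2 = 0 := by omega
        simp [Nat.testBit_zero, this]
      | succ i =>
        rw [Nat.testBit_and]
        simp only [Nat.testBit_succ, hd1, Bool.and_self]
    refine ⟨0, ?_, ?_⟩
    · rw [hkey]; omega
    · intro r
      rw [hkey]
      cases r with
      | zero => simp [Nat.testBit_zero, hmod]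
      | succ i =>
        simp only [Nat.testBit_succ, hd1]
        constructor
        · intro h; right; exact h
        · rintro (h | h)
          · omega
          · exact h

lemma testBit_foldl_or {α : Type} (g : α → Nat) (l : List α) (init : Nat) (t : Nat) :
    ((l.foldl (fun m x => m ||| g x) init).testBit t = true)
      ↔ (init.testBit t = true ∨ ∃ x ∈ l, (g x).testBit t = true) := by
  induction l generalizing init with
  | nil => simp
  | cons x xs IH =>
    simp only [List.foldl_cons]
    rw [IH]
    simp only [Nat.testBit_or, Bool.or_eq_true, List.mem_cons]
    constructor
    · rintro ((h | h) | ⟨y, hy, hf⟩)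
      · exact Or.inl h
      · exact Or.inr ⟨x, Or.inl rfl, h⟩
      · exact Or.inr ⟨y, Or.inr hy, hf⟩
    · rintro (h | ⟨y, (rfl | hy), hf⟩)
      · exact Or.inl (Or.inl h)
      · exact Or.inl (Or.inr hf)
      · exact Or.inr ⟨y, hy, hf⟩

lemma testBit_mfold_inner (reachable : Nat) (p : Int) :
    ∀ rm new t, ((mfold_inner reachable p rm new).testBit t = true)
      ↔ (new.testBit t = true ∨
          ∃ r, rm.testBit r = true ∧ (add_cyclic reachable (r : Int) p).testBit t = true) := by
  intro rm
  induction rm using Nat.strong_induction_on with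
  | _ rm IH =>
  intro new t
  rw [mfold_inner]
  by_cases h0 : rm = 0
  · simp [h0]
  · rw [if_neg h0]
    obtain ⟨e, he, hiff⟩ := lsb_spec rm h0
    have hand : rm &&& (rm - 1) ≤ rm - 1 := Nat.and_le_right
    have hlog : (rm - (rm &&& (rm - 1))).log2 = e := by rw [he]; exact Nat.log2_two_pow
    rw [hlog, IH (rm &&& (rm - 1)) (by omega) _ t, Nat.testBit_or]
    constructor
    · rintro (h | ⟨r, hr, hc⟩)
      · simp only [Bool.or_eq_true] at h
        rcases h with h | h
        · exact Or.inl h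
        · exact Or.inr ⟨e, (hiff e).mpr (Or.inl rfl), h⟩
      · exact Or.inr ⟨r, (hiff r).mpr (Or.inr hr), hc⟩
    · rintro (h | ⟨r, hr, hc⟩)
      · exact Or.inl (by simp [h])
      · rcases (hiff r).mp hr with rfl | hr'
        · exact Or.inl (by simp [hc])
        · exact Or.inr ⟨r, hr', hc⟩

lemma powMod_nonneg (b : Int) (e : Nat) (p : Int) (hp : 0 < p) : 0 ≤ PySem.Int.powMod b e p :=
  PySem.Int.mod_nonneg _ hp

lemma powMod_lt (b : Int) (e : Nat) (p : Int) (hp : 0 < p) : PySem.Int.powMod b e p < p :=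
  PySem.Int.mod_lt _ hp

-- residue mask ↔ residue set
lemma residues_iff (k p : Int) (hp : 0 < p) (t : Nat) :
    ((kth_residues_mask k p).testBit t = true)
      ↔ ((t : Int) ∈ PySem.Set.ofList
            ((PySem.List.pyRange 0 p 1).map (fun x => PySem.Int.powMod x k.toNat p))) := by
  unfold kth_residues_mask
  rw [testBit_foldl_or]
  simp only [Nat.zero_testBit, Bool.false_eq_true, false_or, Nat.one_shiftLeft,
    Nat.testBit_two_pow, decide_eq_true_eq, PySem.Set.mem_ofList, List.mem_map]
  constructor
  · rintro ⟨x, hx, hfx⟩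
    refine ⟨x, hx, ?_⟩
    have h0 := powMod_nonneg x k.toNat p hp
    omega
  · rintro ⟨x, hx, hfx⟩
    exact ⟨x, hx, by omega⟩

lemma residues_bound (k p : Int) (hp : 0 < p) (t : Nat)
    (h : (kth_residues_mask k p).testBit t = true) : t < p.toNat := by
  unfold kth_residues_mask at h
  rw [testBit_foldl_or] at h
  simp only [Nat.zero_testBit, Bool.false_eq_true, false_or, Nat.one_shiftLeft,
    Nat.testBit_two_pow, decide_eq_true_eq] at h
  obtain ⟨x, hx, hfx⟩ := h
  have h1 := powMod_lt x k.toNat p hp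
  have h0 := powMod_nonneg x k.toNat p hp
  omega

-- bits of a mask below 2^P all lie below P, and conversely
lemma MS_bdd_of_lt (P : Nat) (X : Nat) (hX : X < 2 ^ P) : sBdd P (MS X) := by
  intro t ht
  have h1 : 2 ^ t ≤ X := Nat.ge_two_pow_of_testBit ht
  by_contra hc
  have : 2 ^ P ≤ 2 ^ t := Nat.pow_le_pow_right (by omega) (by omega)
  omega

lemma lt_two_pow_of_bdd (P : Nat) (X : Nat) (h : sBdd P (MS X)) : X < 2 ^ P := by
  apply Nat.lt_pow_two_of_testBit
  intro i hi
  by_contra hc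
  have := h i (by simpa [MS] using hc)
  omega

-- the rotation add_cyclic, characterised bitwise
lemma testBit_add_cyclic (P : Nat) (hP : 0 < P) (X : Nat) (hX : X < 2 ^ P)
    (r : Nat) (hr : r < P) (t : Nat) :
    ((add_cyclic X (r : Int) (P : Int)).testBit t = true)
      ↔ (t < P ∧ X.testBit ((t + P - r) % P) = true) := by
  have hs : (PySem.Int.mod (r : Int) (P : Int)).toNat = r := by
    rw [PySem.Int.mod_natCast]
    simp [Nat.mod_eq_of_lt hr]
  have hPt : ((P : Int)).toNat = P := by simp
  simp only [add_cyclic, hs, hPt, Nat.one_shiftLeft, Nat.testBit_and,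
    Nat.testBit_two_pow_sub_one, Nat.testBit_or, Nat.testBit_shiftLeft,
    Nat.testBit_shiftRight, Bool.and_eq_true, Bool.or_eq_true, decide_eq_true_eq,
    ge_iff_le]
  constructor
  · rintro ⟨h1, h2⟩
    refine ⟨h2, ?_⟩
    rcases h1 with ⟨hrt, hbit⟩ | hbit
    · have : (t + P - r) % P = t - r := by
        have h3 : t + P - r = (t - r) + P := by omega
        rw [h3, Nat.add_mod_right, Nat.mod_eq_of_lt (by omega)]
      rwa [this]
    · by_cases hrt : r ≤ t
      · exfalso
        have hfalse : X.testBit (P - r + t) = false := by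
          apply Nat.testBit_eq_false_of_lt
          calc X < 2 ^ P := hX
            _ ≤ 2 ^ (P - r + t) := Nat.pow_le_pow_right (by omega) (by omega)
        rw [hfalse] at hbit
        exact absurd hbit (by simp)
      · have : (t + P - r) % P = t + P - r := Nat.mod_eq_of_lt (by omega)
        rw [this]
        have h4 : P - r + t = t + P - r := by omega
        rwa [h4] at hbit
  · rintro ⟨h2, hbit⟩
    refine ⟨?_, h2⟩
    by_cases hrt : r ≤ t
    · left
      refine ⟨hrt, ?_⟩
      have : (t + P - r) % P = t - r := by
        have h3 : t + P - r = (t - r) + P := by omega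
        rw [h3, Nat.add_mod_right, Nat.mod_eq_of_lt (by omega)]
      rwa [this] at hbit
    · right
      have : (t + P - r) % P = t + P - r := Nat.mod_eq_of_lt (by omega)
      rw [this] at hbit
      have h4 : P - r + t = t + P - r := by omega
      rwa [h4]

-- one round of A is one abstract cyclic sumset
lemma MS_round (P : Nat) (hP : 0 < P) (res X : Nat)
    (hres : ∀ r, res.testBit r = true → r < P) (hX : X < 2 ^ P) :
    MS (mfold_inner X (P : Int) res 0) = sAdd P (MS X) (MS res) := by
  funext t
  apply propext
  show (mfold_inner X (P : Int) res 0).testBit t = true ↔ _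
  rw [testBit_mfold_inner]
  simp only [Nat.zero_testBit, Bool.false_eq_true, false_or]
  constructor
  · rintro ⟨r, hr, hc⟩
    have hrP := hres r hr
    obtain ⟨ht, hbit⟩ := (testBit_add_cyclic P hP X hX r hrP t).mp hc
    refine ⟨(t + P - r) % P, r, hbit, hr, ?_⟩
    rw [Nat.mod_add_mod]
    have h1 : t + P - r + r = t + P := by omega
    rw [h1, Nat.add_mod_right, Nat.mod_eq_of_lt ht]
  · rintro ⟨i, j, hi, hj, rfl⟩
    have hjP := hres j hj
    have hiP : i < P := MS_bdd_of_lt P X hX i hi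
    refine ⟨j, hj, ?_⟩
    rw [testBit_add_cyclic P hP X hX j hjP]
    refine ⟨Nat.mod_lt _ hP, ?_⟩
    have hkey : ((i + j) % P + P - j) % P = i := by
      rcases Nat.lt_or_ge (i + j) P with hlt | hge
      · rw [Nat.mod_eq_of_lt hlt]
        have h3 : i + j + P - j = i + P := by omega
        rw [h3, Nat.add_mod_right, Nat.mod_eq_of_lt hiP]
      · have h1 : (i + j) % P = i + j - P := by
          rw [Nat.mod_eq_sub_mod hge, Nat.mod_eq_of_lt (by omega)]
        rw [h1]
        have h3 : i + j - P + P - j = i := by omega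
        rw [h3, Nat.mod_eq_of_lt hiP]
    rwa [hkey]

lemma foldl_range_iterate (f : Nat → Nat) (n : Nat) (X : Nat) :
    (List.range n).foldl (fun r _ => f r) X = f^[n] X := by
  induction n with
  | zero => simp
  | succ n IH =>
    rw [List.range_succ, List.foldl_append, IH]
    simp [Function.iterate_succ_apply']

-- A's reachable mask realises the abstract power
lemma MS_msm (P : Nat) (hP : 0 < P) (res : Nat)
    (hres : ∀ r, res.testBit r = true → r < P) (m : Int) :
    MS (mfold_sumset_mask res m (P : Int)) = sPow P (MS res) m.toNat := by
  unfold mfold_sumset_mask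
  rw [foldl_range_iterate (fun X => mfold_inner X (P : Int) res 0)]
  induction m.toNat with
  | zero =>
    funext t
    apply propext
    simp only [Function.iterate_zero, id, sPow, MS]
    rw [show (1 : Nat) = 2 ^ 0 from rfl, Nat.testBit_two_pow]
    simp [eq_comm]
  | succ n IH =>
    have hlt : (fun X => mfold_inner X (P : Int) res 0)^[n] 1 < 2 ^ P := by
      apply lt_two_pow_of_bdd
      cases n with
      | zero =>
        intro t ht
        simp only [Function.iterate_zero, id, MS] at ht
        rw [show (1 : Nat) = 2 ^ 0 from rfl, Nat.testBit_two_pow] at ht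
        simp at ht
        omega
      | succ n' =>
        intro t ht
        have := congrFun IH t
        rw [MS] at this
        rw [MS, this] at ht
        exact sBdd_sPow P hP _ _ t ht
    rw [Function.iterate_succ_apply', MS_round P hP res _ hres hlt, IH, sPow, sAdd_comm]

-- ===== the Kronecker-substitution convolution, characterised elementwise =====

-- exact-count model: encL is the base-2^w packing of a digit list, convL the Cauchy product
def encL (w : Nat) : List Nat → Nat
  | [] => 0
  | x :: xs => x + 2 ^ w * encL w xs

def digs (bs : List Bool) : List Nat := bs.map (fun x => if x then 1 else 0)

def addL : List Nat → List Nat → List Nat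
  | [], M => M
  | L, [] => L
  | x :: L, y :: M => (x + y) :: addL L M

def convL : List Nat → List Nat → List Nat
  | [], _ => []
  | x :: xs, B => addL (B.map (fun y => x * y)) (0 :: convL xs B)

lemma encL_append (w : Nat) (L M : List Nat) :
    encL w (L ++ M) = encL w L + 2 ^ (L.length * w) * encL w M := by
  induction L with
  | nil => simp [encL]
  | cons x L IH =>
    simp only [List.cons_append, encL, IH, List.length_cons]
    rw [Nat.succ_mul, pow_add]
    ring

lemma addL_getD (L M : List Nat) (t : Nat) :
    (addL L M).getD t 0 = L.getD t 0 + M.getD t 0 := by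
  induction L generalizing M t with
  | nil => simp [addL]
  | cons x L IH =>
    cases M with
    | nil => simp [addL]
    | cons y M =>
      cases t with
      | zero => simp [addL]
      | succ t =>
        simp only [addL, List.getD_cons_succ]
        exact IH M t

lemma mapmul_getD (x : Nat) (B : List Nat) (t : Nat) :
    (B.map (fun y => x * y)).getD t 0 = x * B.getD t 0 := by
  induction B generalizing t with
  | nil => simp
  | cons y B IH =>
    cases t with
    | zero => simp
    | succ t =>
      simp only [List.map_cons, List.getD_cons_succ]
      exact IH t

lemma encL_addL (w : Nat) (L M : List Nat) :
    encL w (addL L M) = encL w L + encL w M := by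
  induction L generalizing M with
  | nil => simp [addL, encL]
  | cons x L IH =>
    cases M with
    | nil => simp [addL, encL]
    | cons y M =>
      simp only [addL, encL, IH]
      ring

lemma encL_mapmul (w : Nat) (x : Nat) (B : List Nat) :
    encL w (B.map (fun y => x * y)) = x * encL w B := by
  induction B with
  | nil => simp [encL]
  | cons y B IH =>
    simp only [List.map_cons, encL, IH]
    ring

lemma encL_convL (w : Nat) (A B : List Nat) :
    encL w (convL A B) = encL w A * encL w B := by
  induction A with
  | nil => simp [convL, encL]
  | cons x A IH =>
    simp only [convL, encL_addL, encL_mapmul, encL, IH]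
    ring

lemma convL_getD_nonzero (A B : List Nat) (t : Nat) :
    (convL A B).getD t 0 ≠ 0 ↔ ∃ i j, i + j = t ∧ A.getD i 0 ≠ 0 ∧ B.getD j 0 ≠ 0 := by
  induction A generalizing t with
  | nil =>
    simp [convL]
  | cons x A IH =>
    rw [convL, addL_getD, mapmul_getD]
    cases t with
    | zero =>
      simp only [List.getD_cons_zero]
      constructor
      · intro h
        have h' : x * B.getD 0 0 ≠ 0 := by omega
        rcases Nat.mul_ne_zero_iff.mp h' with ⟨hx, hB⟩
        exact ⟨0, 0, rfl, by simpa using hx, hB⟩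
      · rintro ⟨i, j, hij, hi, hj⟩
        have hi0 : i = 0 := by omega
        have hj0 : j = 0 := by omega
        subst hi0; subst hj0
        simp only [List.getD_cons_zero] at hi
        have := Nat.mul_ne_zero hi hj
        omega
    | succ t =>
      simp only [List.getD_cons_succ]
      constructor
      · intro h
        rcases Nat.eq_zero_or_pos (x * B.getD (t + 1) 0) with h1 | h1
        · have h2 : (convL A B).getD t 0 ≠ 0 := by omega
          obtain ⟨i, j, hij, hi, hj⟩ := (IH t).mp h2
          exact ⟨i + 1, j, by omega, by simpa using hi, hj⟩
        · have h1' : x * B.getD (t + 1) 0 ≠ 0 := by omega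
          rcases Nat.mul_ne_zero_iff.mp h1' with ⟨hx, hB⟩
          refine ⟨0, t + 1, by omega, ?_, by omega⟩
          simp only [List.getD_cons_zero]
          omega
      · rintro ⟨i, j, hij, hi, hj⟩
        cases i with
        | zero =>
          simp only [List.getD_cons_zero] at hi
          have hj' : j = t + 1 := by omega
          subst hj'
          have : 0 < x * B.getD (t + 1) 0 := Nat.mul_pos (by omega) (by omega)
          omega
        | succ i =>
          simp only [List.getD_cons_succ] at hi
          have : (convL A B).getD t 0 ≠ 0 := (IH t).mpr ⟨i, j, by omega, hi, hj⟩
          omega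

lemma convL_getD_le (A B : List Nat) (hA : ∀ s, A.getD s 0 ≤ 1) (hB : ∀ s, B.getD s 0 ≤ 1)
    (t : Nat) : (convL A B).getD t 0 ≤ A.length := by
  induction A generalizing t with
  | nil => simp [convL]
  | cons x A IH =>
    rw [convL, addL_getD, mapmul_getD]
    have hx : x ≤ 1 := by simpa using hA 0
    have hBt : B.getD t 0 ≤ 1 := hB t
    have htail : (0 :: convL A B).getD t 0 ≤ A.length := by
      cases t with
      | zero => simp
      | succ t =>
        simp only [List.getD_cons_succ]
        exact IH (fun s => by simpa using hA (s + 1)) t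
    have hxB : x * B.getD t 0 ≤ 1 := by
      calc x * B.getD t 0 ≤ 1 * 1 := Nat.mul_le_mul hx hBt
        _ = 1 := by omega
    simp only [List.length_cons]
    omega

lemma digs_getD (bs : List Bool) (s : Nat) :
    (digs bs).getD s 0 = if bs.getD s false then 1 else 0 := by
  induction bs generalizing s with
  | nil => simp [digs]
  | cons x bs IH =>
    cases s with
    | zero => simp [digs]
    | succ s => simpa [digs] using IH s

lemma encL_digit (w : Nat) (hw : 0 < w) :
    ∀ (L : List Nat), (∀ s, L.getD s 0 < 2 ^ w) → ∀ t,
      encL w L / 2 ^ (t * w) % 2 ^ w = L.getD t 0 := by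
  intro L
  induction L with
  | nil => intro _ t; simp [encL]
  | cons x xs IH =>
    intro hL t
    have hx : x < 2 ^ w := by simpa using hL 0
    cases t with
    | zero =>
      simp only [Nat.zero_mul, pow_zero, Nat.div_one, encL, List.getD_cons_zero]
      rw [Nat.add_mul_mod_self_left, Nat.mod_eq_of_lt hx]
    | succ t =>
      have hsplit : (t + 1) * w = w + t * w := by ring
      rw [encL, List.getD_cons_succ, hsplit, pow_add, ← Nat.div_div_eq_div_mul,
        Nat.add_mul_div_left _ _ (by positivity),
        Nat.div_eq_of_lt hx, Nat.zero_add]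
      exact IH (fun s => by simpa using hL (s + 1)) t

lemma pack_eq (w : Nat) : ∀ (bits : List Bool), pvPack bits w = encL w (digs bits) := by
  have main : ∀ n (bits : List Bool), bits.length = n → pvPack bits w = encL w (digs bits) := by
    intro n
    induction n using Nat.strong_induction_on with
    | _ n IH =>
      intro bits hlen
      rw [pvPack]
      by_cases h0 : bits.length = 0
      · rw [if_pos h0]
        obtain rfl := List.eq_nil_of_length_eq_zero h0
        simp [digs, encL]
      · rw [if_neg h0]
        by_cases h1 : bits.length = 1
        · rw [if_pos h1]
          obtain ⟨x, rfl⟩ := List.length_eq_one_iff.mp h1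
          simp [digs, encL, PySem.List.pyGetD_zero]
        · rw [if_neg h1]
          have h2 : 2 ≤ bits.length := by omega
          rw [PySem.List.slice_to bits (by positivity), PySem.List.slice_from bits (by positivity)]
          simp only [Int.toNat_natCast]
          have hto : (bits.take (bits.length / 2)).length = bits.length / 2 := by
            simp only [List.length_take]
            omega
          have hfrom : (bits.drop (bits.length / 2)).length = bits.length - bits.length / 2 := by
            simp [List.length_drop]
          rw [IH (bits.length / 2) (by omega) _ hto,
            IH (bits.length - bits.length / 2) (by omega) _ hfrom]
          have hsplit : digs bits = digs (bits.take (bits.length / 2))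
              ++ digs (bits.drop (bits.length / 2)) := by
            rw [digs, digs, digs, ← List.map_append, List.take_append_drop]
          rw [hsplit, encL_append, Nat.shiftLeft_eq]
          have hdlen : (digs (bits.take (bits.length / 2))).length = bits.length / 2 := by
            rw [digs, List.length_map]
            exact hto
          rw [hdlen]
          ring
  exact fun bits => main bits.length bits rfl

lemma fieldsNZ_length (w : Nat) : ∀ n (x : Nat), (pvFieldsNZ x n w).length = n := by
  intro n
  induction n using Nat.strong_induction_on with
  | _ n IH =>
    intro x
    rw [pvFieldsNZ]
    by_cases h0 : n = 0
    · simp [h0]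
    · rw [if_neg h0]
      by_cases h1 : n = 1
      · simp [h1]
      · rw [if_neg h1]
        rw [List.length_append, IH (n / 2) (by omega), IH (n - n / 2) (by omega)]
        omega

lemma field_lo (x h t w : Nat) (ht : t < h) :
    (x % 2 ^ (h * w)) / 2 ^ (t * w) % 2 ^ w = x / 2 ^ (t * w) % 2 ^ w := by
  have hsplit : h * w = t * w + (h - t) * w := by
    rw [← Nat.add_mul]
    congr 1
    omega
  rw [hsplit, pow_add, Nat.mod_mul_right_div_self]
  exact Nat.mod_mod_of_dvd _ (pow_dvd_pow 2 (Nat.le_mul_of_pos_left w (by omega)))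

lemma field_hi (x h t w : Nat) (hht : h ≤ t) :
    (x / 2 ^ (h * w)) / 2 ^ ((t - h) * w) % 2 ^ w = x / 2 ^ (t * w) % 2 ^ w := by
  rw [Nat.div_div_eq_div_mul, ← pow_add]
  have : h * w + (t - h) * w = t * w := by
    rw [← Nat.add_mul]
    congr 1
    omega
  rw [this]

lemma fieldsNZ_getD (w : Nat) :
    ∀ n (x t : Nat), ((pvFieldsNZ x n w).getD t false = true)
      ↔ (t < n ∧ x / 2 ^ (t * w) % 2 ^ w ≠ 0) := by
  intro n
  induction n using Nat.strong_induction_on with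
  | _ n IH =>
    intro x t
    rw [pvFieldsNZ]
    by_cases h0 : n = 0
    · simp [h0]
    · rw [if_neg h0]
      by_cases h1 : n = 1
      · rw [if_pos h1]
        cases t with
        | zero =>
          simp only [List.getD_cons_zero, Nat.one_shiftLeft,
            Nat.and_two_pow_sub_one_eq_mod, bne_iff_ne, ne_eq]
          simp [h1]
        | succ t => simp [h1]
      · rw [if_neg h1]
        have hlen : (pvFieldsNZ (x &&& ((1 <<< (n / 2 * w)) - 1)) (n / 2) w).length = n / 2 :=
          fieldsNZ_length w (n / 2) _
        by_cases ht : t < n / 2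
        · rw [List.getD_append _ _ _ _ (by omega), IH (n / 2) (by omega)]
          rw [Nat.one_shiftLeft, Nat.and_two_pow_sub_one_eq_mod, field_lo x (n / 2) t w ht]
          constructor
          · rintro ⟨_, hx⟩; exact ⟨by omega, hx⟩
          · rintro ⟨_, hx⟩; exact ⟨ht, hx⟩
        · rw [List.getD_append_right _ _ _ _ (by omega), hlen, IH (n - n / 2) (by omega)]
          rw [Nat.shiftRight_eq_div_pow, field_hi x (n / 2) t w (by omega)]
          constructor
          · rintro ⟨h2, hx⟩; exact ⟨by omega, hx⟩
          · rintro ⟨h2, hx⟩; exact ⟨by omega, hx⟩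

-- the marking loop 'for t in …: if cond(t): out[q(t)] = True', characterised
lemma mark_length (cond : Int → Bool) (q : Int → Nat) :
    ∀ (l : List Int) (init : List Bool),
      (l.foldl (fun out t => if cond t then out.set (q t) true else out) init).length
        = init.length := by
  intro l
  induction l with
  | nil => intro init; rfl
  | cons t ts IH =>
    intro init
    simp only [List.foldl_cons]
    by_cases h : cond t
    · rw [if_pos h, IH, List.length_set]
    · rw [if_neg h, IH]

lemma mark_getD (cond : Int → Bool) (q : Int → Nat) :
    ∀ (l : List Int) (init : List Bool) (s : Nat),
      ((l.foldl (fun out t => if cond t then out.set (q t) true else out) init).getD s false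
          = true)
        ↔ (init.getD s false = true ∨ ∃ t ∈ l, cond t = true ∧ q t = s ∧ s < init.length) := by
  intro l
  induction l with
  | nil => simp
  | cons t ts IH =>
    intro init s
    simp only [List.foldl_cons]
    by_cases h : cond t
    · rw [if_pos h, IH, List.length_set]
      constructor
      · rintro (hset | ⟨u, hu, hcu, hqu, hs⟩)
        · rw [List.getD_eq_getElem?_getD, List.getElem?_set] at hset
          by_cases hq : q t = s
          · rw [if_pos hq] at hset
            by_cases hlt : q t < init.length
            · exact Or.inr ⟨t, by simp, h, hq, by omega⟩
            · rw [if_neg hlt] at hset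
              exact absurd hset (by simp)
          · rw [if_neg hq, ← List.getD_eq_getElem?_getD] at hset
            exact Or.inl hset
        · exact Or.inr ⟨u, by simp [hu], hcu, hqu, hs⟩
      · rintro (hinit | ⟨u, hu, hcu, hqu, hs⟩)
        · left
          have hs' : s < init.length := by
            by_contra hns
            rw [List.getD_eq_default _ _ (by omega)] at hinit
            exact absurd hinit (by simp)
          rw [List.getD_eq_getElem?_getD, List.getElem?_set]
          by_cases hq : q t = s
          · rw [if_pos hq, if_pos (by omega)]
            rfl
          · rw [if_neg hq, ← List.getD_eq_getElem?_getD]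
            exact hinit
        · rcases List.mem_cons.mp hu with rfl | hmem
          · left
            rw [List.getD_eq_getElem?_getD, List.getElem?_set, if_pos hqu, if_pos (by omega)]
            rfl
          · exact Or.inr ⟨u, hmem, hcu, hqu, hs⟩
    · rw [if_neg h, IH]
      constructor
      · rintro (hinit | ⟨u, hu, hcu, hqu, hs⟩)
        · exact Or.inl hinit
        · exact Or.inr ⟨u, by simp [hu], hcu, hqu, hs⟩
      · rintro (hinit | ⟨u, hu, hcu, hqu, hs⟩)
        · exact Or.inl hinit
        · rcases List.mem_cons.mp hu with rfl | hmem
          · exact absurd hcu (by simp [h])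
          · exact Or.inr ⟨u, hmem, hcu, hqu, hs⟩

lemma pvConv_length (p : Int) (a b : List Bool) : (pvConv p a b).length = p.toNat := by
  show (List.foldl _ (List.replicate p.toNat false) _).length = p.toNat
  rw [PySem.List.foldl_congr_mem _ _
    (fun out t => if PySem.List.pyGetD
        (pvFieldsNZ (pvPack a (PySem.Int.bitLength p + 1) * pvPack b (PySem.Int.bitLength p + 1))
          (2 * p - 1).toNat (PySem.Int.bitLength p + 1)) t false
      then out.set (PySem.Int.mod t p).toNat true else out) _ ?_]
  · rw [mark_length, List.length_replicate]
  · intro acc t ht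
    rw [PySem.List.mem_pyRange_one] at ht
    have h0 : (0 : Int) ≤ t := ht.1
    by_cases hc : PySem.List.pyGetD
        (pvFieldsNZ (pvPack a (PySem.Int.bitLength p + 1) * pvPack b (PySem.Int.bitLength p + 1))
          (2 * p - 1).toNat (PySem.Int.bitLength p + 1)) t false
    · simp only [if_pos hc]
      have hp' : 0 < p := by omega
      have hmn : (0 : Int) ≤ PySem.Int.mod t p := PySem.Int.mod_nonneg t hp'
      conv_lhs => rw [show PySem.Int.mod t p = (((PySem.Int.mod t p).toNat : Nat) : Int) from
          (Int.toNat_of_nonneg hmn).symm]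
      rw [PySem.List.pySetD_natCast]
    · simp only [if_neg hc]

lemma bdd_of_len (P : Nat) (a : List Bool) (hla : a.length = P) : sBdd P (TS a) := by
  intro t ht
  by_contra hc
  rw [TS, List.getD_eq_default _ _ (by omega)] at ht
  exact absurd ht (by simp)

lemma TS_conv (P : Nat) (hP : 0 < P) (a b : List Bool)
    (hla : a.length = P) (hlb : b.length = P) :
    TS (pvConv (P : Int) a b) = sAdd P (TS a) (TS b) := by
  have ha := bdd_of_len P a hla
  have hb := bdd_of_len P b hlb
  set w := PySem.Int.bitLength (P : Int) + 1 with hwdef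
  have hw : 0 < w := by omega
  have hPw : P < 2 ^ w := by
    have h1 := PySem.Int.lt_two_pow_bitLength (P : Int)
    have h2 : ((P : Int)).natAbs = P := by simp
    rw [h2] at h1
    calc P < 2 ^ PySem.Int.bitLength (P : Int) := h1
      _ ≤ 2 ^ w := Nat.pow_le_pow_right (by omega) (by omega)
  have hn : ((2 * (P : Int) - 1)).toNat = 2 * P - 1 := by omega
  -- the digit list of the product is the Cauchy product of the digit lists
  have hdigA : ∀ s, (digs a).getD s 0 ≤ 1 := by
    intro s; rw [digs_getD]; split <;> omega
  have hdigB : ∀ s, (digs b).getD s 0 ≤ 1 := by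
    intro s; rw [digs_getD]; split <;> omega
  have hbound : ∀ s, (convL (digs a) (digs b)).getD s 0 < 2 ^ w := by
    intro s
    have h1 := convL_getD_le (digs a) (digs b) hdigA hdigB s
    have h2 : (digs a).length = P := by simp [digs, hla]
    omega
  have hfield : ∀ tn : Nat,
      (pvPack a w * pvPack b w) / 2 ^ (tn * w) % 2 ^ w = (convL (digs a) (digs b)).getD tn 0 := by
    intro tn
    rw [pack_eq, pack_eq, ← encL_convL]
    exact encL_digit w hw _ hbound tn
  funext s
  apply propext
  have hTS : TS (pvConv (P : Int) a b) s ↔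
      (∃ t ∈ PySem.List.pyRange 0 (2 * (P : Int) - 1) 1,
        (PySem.List.pyGetD (pvFieldsNZ (pvPack a w * pvPack b w) (2 * (P : Int) - 1).toNat w)
            t false) = true
          ∧ (PySem.Int.mod t (P : Int)).toNat = s ∧ s < P) := by
    show ((List.foldl _ (List.replicate ((P : Int)).toNat false) _).getD s false = true) ↔ _
    rw [PySem.List.foldl_congr_mem _ _
      (fun out t => if PySem.List.pyGetD
          (pvFieldsNZ (pvPack a w * pvPack b w) (2 * (P : Int) - 1).toNat w) t false
        then out.set (PySem.Int.mod t (P : Int)).toNat true else out) _ ?_]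
    · rw [mark_getD]
      simp only [List.length_replicate, Int.toNat_natCast]
      constructor
      · rintro (hrep | hx)
        · exfalso
          by_cases hsP : s < P
          · rw [List.getD_replicate _ (by simpa using hsP)] at hrep
            exact absurd hrep (by simp)
          · rw [List.getD_eq_default _ _ (by simp only [List.length_replicate]; omega)] at hrep
            exact absurd hrep (by simp)
        · exact hx
      · exact fun hx => Or.inr hx
    · intro acc t ht
      rw [PySem.List.mem_pyRange_one] at ht
      have hp' : (0 : Int) < (P : Int) := by exact_mod_cast hP
      have hmn : (0 : Int) ≤ PySem.Int.mod t (P : Int) := PySem.Int.mod_nonneg t hp'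
      simp only [← hwdef]
      by_cases hc : PySem.List.pyGetD
          (pvFieldsNZ (pvPack a w * pvPack b w) (2 * (P : Int) - 1).toNat w) t false
      · simp only [if_pos hc]
        conv_lhs => rw [show PySem.Int.mod t (P : Int)
            = (((PySem.Int.mod t (P : Int)).toNat : Nat) : Int) from
            (Int.toNat_of_nonneg hmn).symm]
        rw [PySem.List.pySetD_natCast]
      · simp only [if_neg hc]
  rw [hTS]
  constructor
  · rintro ⟨t, htmem, hcond, hqs, hsP⟩
    rw [PySem.List.mem_pyRange_one] at htmem
    obtain ⟨ht0, htlt⟩ := htmem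
    obtain ⟨tn, rfl⟩ : ∃ tn : Nat, t = (tn : Int) := ⟨t.toNat, (Int.toNat_of_nonneg ht0).symm⟩
    rw [PySem.List.pyGetD_natCast, hn, fieldsNZ_getD, hfield] at hcond
    obtain ⟨htn, hnz⟩ := hcond
    obtain ⟨i, j, hij, hi, hj⟩ := (convL_getD_nonzero _ _ tn).mp hnz
    rw [digs_getD] at hi hj
    have hia : a.getD i false = true := by revert hi; split <;> simp_all
    have hjb : b.getD j false = true := by revert hj; split <;> simp_all
    refine ⟨i, j, hia, hjb, ?_⟩
    rw [hij]
    rw [PySem.Int.mod_natCast] at hqs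
    simpa using hqs
  · rintro ⟨i, j, hi, hj, rfl⟩
    have hiP : i < P := ha i hi
    have hjP : j < P := hb j hj
    refine ⟨((i + j : Nat) : Int), ?_, ?_, ?_, Nat.mod_lt _ hP⟩
    · rw [PySem.List.mem_pyRange_one]
      constructor
      · exact_mod_cast Nat.zero_le (i + j)
      · have : i + j < 2 * P - 1 := by omega
        omega
    · rw [PySem.List.pyGetD_natCast, hn, fieldsNZ_getD, hfield]
      refine ⟨by omega, ?_⟩
      apply (convL_getD_nonzero _ _ (i + j)).mpr
      refine ⟨i, j, rfl, ?_, ?_⟩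
      · have hi' : a.getD i false = true := hi
        rw [digs_getD, if_pos hi']
        omega
      · have hj' : b.getD j false = true := hj
        rw [digs_getD, if_pos hj']
        omega
    · rw [PySem.Int.mod_natCast, Int.toNat_natCast]

-- the binary-exponentiation loop realises the abstract power
lemma TS_binexp (P : Nat) (hP : 0 < P) :
    ∀ (e : Int) (acc base : List Bool), acc.length = P → base.length = P →
      TS (pvBinExp (P : Int) acc base e) = sAdd P (TS acc) (sPow P (TS base) e.toNat) := by
  have hconvlen : ∀ (x y : List Bool), (pvConv (P : Int) x y).length = P := by
    intro x y
    rw [pvConv_length]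
    simp
  have main : ∀ n : Nat, ∀ e : Int, e.toNat = n → ∀ acc base : List Bool,
      acc.length = P → base.length = P →
      TS (pvBinExp (P : Int) acc base e) = sAdd P (TS acc) (sPow P (TS base) e.toNat) := by
    intro n
    induction n using Nat.strong_induction_on with
    | _ n IH =>
      intro e he acc base hacc hbase
      rw [pvBinExp]
      by_cases h0 : e ≤ 0
      · rw [if_pos h0]
        have h1 : e.toNat = 0 := by omega
        rw [h1, sPow, sAdd_sing P hP _ (bdd_of_len P acc hacc)]
      · rw [if_neg h0]
        have hdiv : PySem.Int.floordiv e 2 = e / 2 := PySem.Int.floordiv_eq_ediv_of_pos (by omega)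
        have hmod : PySem.Int.mod e 2 = e % 2 := PySem.Int.mod_eq_emod_of_pos (by omega)
        by_cases hodd : (PySem.Int.mod e 2 == 1) = true
        · rw [if_pos hodd, hdiv,
            IH (e / 2).toNat (by omega) (e / 2) rfl _ _ (hconvlen _ _) (hconvlen _ _),
            TS_conv P hP acc base hacc hbase, TS_conv P hP base base hbase hbase,
            sPow_two_mul P hP, sAdd_assoc]
          have hm1 : e % 2 = 1 := by rw [← hmod]; exact beq_iff_eq.mp hodd
          have he2 : e.toNat = 2 * (e / 2).toNat + 1 := by omega
          rw [he2, sPow]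
        · rw [if_neg hodd, hdiv,
            IH (e / 2).toNat (by omega) (e / 2) rfl _ _ hacc (hconvlen _ _),
            TS_conv P hP base base hbase hbase, sPow_two_mul P hP]
          have hm0 : e % 2 = 0 := by
            have := hodd
            rw [beq_iff_eq, hmod] at this
            omega
          have he2 : e.toNat = 2 * (e / 2).toNat := by omega
          rw [he2]
  intro e acc base hacc hbase
  exact main e.toNat e rfl acc base hacc hbase

-- B's base table is A's residue mask
lemma TS_base (k : Int) (P : Nat) (hP : 0 < P) :
    TS ((PySem.List.pyRange 0 (P : Int) 1).map (fun r => PySem.Set.contains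
        (PySem.Set.ofList ((PySem.List.pyRange 0 (P : Int) 1).map
          (fun x => PySem.Int.powMod x k.toNat (P : Int)))) r))
      = MS (kth_residues_mask k (P : Int)) := by
  have hPi : (0 : Int) < (P : Int) := by exact_mod_cast hP
  funext t
  apply propext
  by_cases htP : t < P
  · show (_ : List Bool).getD t false = true ↔ _
    rw [← PySem.List.pyGetD_natCast,
      PySem.List.pyGetD_map_pyRange_of_nonneg _ _ _ _ (by exact_mod_cast Nat.zero_le t)
        (by exact_mod_cast htP)]
    rw [MS, residues_iff k (P : Int) hPi t]
    exact ⟨fun h => by simpa using h, fun h => by simpa using h⟩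
  · constructor
    · intro ht
      exfalso
      have hlen : ((PySem.List.pyRange 0 (P : Int) 1).map (fun r => PySem.Set.contains
          (PySem.Set.ofList ((PySem.List.pyRange 0 (P : Int) 1).map
            (fun x => PySem.Int.powMod x k.toNat (P : Int)))) r)).length = P := by
        simp [PySem.List.length_pyRange_one]
      rw [TS, List.getD_eq_default _ _ (by omega)] at ht
      exact absurd ht (by simp)
    · intro ht
      have := residues_bound k (P : Int) hPi t ht
      simp at this
      omega

-- B's table equals A's mask, elementwise
lemma reach_eq (k m : Int) (P : Nat) (hP : 0 < P) :
    TS (pv_reach k m (P : Int)) = MS (mfold_sumset_mask (kth_residues_mask k (P : Int)) m (P : Int)) := by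
  have hPi : (0 : Int) < (P : Int) := by exact_mod_cast hP
  have hone : TS ((PySem.List.pyRange 0 (P : Int) 1).map (fun r => r == 0)) = fun t => t = 0 := by
    funext t
    apply propext
    by_cases htP : t < P
    · show (_ : List Bool).getD t false = true ↔ _
      rw [← PySem.List.pyGetD_natCast,
        PySem.List.pyGetD_map_pyRange_of_nonneg _ _ _ _ (by exact_mod_cast Nat.zero_le t)
          (by exact_mod_cast htP)]
      simp
    · constructor
      · intro ht
        exfalso
        have hlen : ((PySem.List.pyRange 0 (P : Int) 1).map (fun r : Int => r == 0)).length = P := by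
          simp [PySem.List.length_pyRange_one]
        rw [TS, List.getD_eq_default _ _ (by omega)] at ht
        exact absurd ht (by simp)
      · intro ht; omega
  have hone_len : ((PySem.List.pyRange 0 (P : Int) 1).map (fun r : Int => r == 0)).length = P := by
    simp [PySem.List.length_pyRange_one]
  have hbase_len : ((PySem.List.pyRange 0 (P : Int) 1).map (fun r => PySem.Set.contains
      (PySem.Set.ofList ((PySem.List.pyRange 0 (P : Int) 1).map
        (fun x => PySem.Int.powMod x k.toNat (P : Int)))) r)).length = P := by
    simp [PySem.List.length_pyRange_one]
  have hres : ∀ r, (kth_residues_mask k (P : Int)).testBit r = true → r < P := by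
    intro r hr
    have := residues_bound k (P : Int) hPi r hr
    simpa using this
  unfold pv_reach
  rw [TS_binexp P hP m _ _ hone_len hbase_len, TS_base k P hP, MS_msm P hP _ hres m,
    sAdd_comm, hone, sAdd_sing P hP _ (sBdd_sPow P hP _ _)]

lemma bit_lookup (x i : Nat) : (!((x >>> i) &&& 1 == 0)) = x.testBit i := by
  rw [← Nat.add_zero i, ← Nat.testBit_shiftRight, Nat.testBit_zero, Nat.and_one_is_mod]
  have h2 : (x >>> i) % 2 = 0 ∨ (x >>> i) % 2 = 1 := by omega
  rcases h2 with h | h <;> simp [h]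

lemma sieve_check_eq_all (k b : Int) (ts : List (Int × Nat)) :
    sieve_check k b ts
      = ts.all (fun pr => !((pr.2 >>> (PySem.Int.powMod b k.toNat pr.1).toNat) &&& 1 == 0)) := by
  induction ts with
  | nil => rfl
  | cons hd rest IH =>
    obtain ⟨p, reachable⟩ := hd
    cases h : ((reachable >>> (PySem.Int.powMod b k.toNat p).toNat) % 2 == 0) with
    | true => simp [sieve_check, Nat.and_one_is_mod, h]
    | false => simp [sieve_check, Nat.and_one_is_mod, h, IH]

lemma pvAllCongr {α : Type} (l : List α) (f g : α → Bool) (h : ∀ x ∈ l, f x = g x) :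
    l.all f = l.all g := by
  induction l with
  | nil => rfl
  | cons x xs IH =>
    simp only [List.all_cons, h x (by simp), IH (fun y hy => h y (by simp [hy]))]

theorem sieve_b_values_spec : Claim_equal_sieve_b_values := by
  intro k m primes max_b hdom hpre
  obtain ⟨_hk, hprim⟩ := hpre
  show sieve_b_values k m primes max_b = sieve_b_values_alt k m primes max_b
  simp only [sieve_b_values, sieve_b_values_alt]
  rw [PySem.List.foldl_append_singleton_eq_map
    (fun p => (p, mfold_sumset_mask (kth_residues_mask k p) m p)) primes []]
  rw [PySem.List.foldl_append_if _ (fun b => b) _ _]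
  simp only [List.nil_append, List.map_id']
  rcases hprim with hall | hmb
  · apply List.filter_congr
    intro b hb
    rw [sieve_check_eq_all, List.all_map, List.all_map]
    apply pvAllCongr
    intro p hp'
    have hp : 0 < p := hall p hp'
    simp only [Function.comp]
    obtain ⟨P, rfl⟩ : ∃ P : Nat, p = (P : Int) := ⟨p.toNat, (Int.toNat_of_nonneg hp.le).symm⟩
    have hPpos : 0 < P := by exact_mod_cast hp
    rw [bit_lookup]
    have h0 := powMod_nonneg b k.toNat (P : Int) hp
    have hcast : PySem.Int.powMod b k.toNat (P : Int)
        = (((PySem.Int.powMod b k.toNat (P : Int)).toNat : Nat) : Int) :=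
      (Int.toNat_of_nonneg h0).symm
    rw [hcast, PySem.List.pyGetD_natCast]
    rw [Bool.eq_iff_iff]
    have h := congrFun (reach_eq k m P hPpos) (PySem.Int.powMod b k.toNat (P : Int)).toNat
    simp only [TS, MS] at h
    simp only [Int.toNat_natCast]
    exact (iff_of_eq h).symm
  · rw [PySem.List.pyRange_one_eq_nil (by omega : max_b + 1 ≤ 2)]
    simp
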